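-- pv_equiv track=rewrite | github.com/Pat4008/BCD_Converter | BCD_8.py | unpacked_bcd
-- ===== SOURCE A (Python) =====
-- def unsigned_binary(decimal):
--     binary = ''
--     while decimal > 0:
--         binary = chr((decimal & 1) + 0x30) + binary
--         decimal = decimal >> 1
--     return binary
--
-- def unpacked_bcd(decimal):
--     bcd = ''
--     for unit in decimal:
--         temp = unsigned_binary(int(unit))
--         while len(temp) < 8:
--             temp = '0' + temp
--         bcd = bcd + temp
--     return bcd
-- ===== SOURCE B (Python) =====
-- _BCD = {str(v): format(v, '08b') for v in range(10)}
--
-- def unpacked_bcd(decimal):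
--     return ''.join([_BCD[unit] for unit in decimal])
-- ===== Notes on version B (the rewrite author's own statement) =====
-- stated objective: faster
-- what changed: Replaces the per-digit bit-shift conversion and while-loop zero padding with a 10-entry lookup table built once before the function; the function body is a single join over table lookups.
import Mathlib
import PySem

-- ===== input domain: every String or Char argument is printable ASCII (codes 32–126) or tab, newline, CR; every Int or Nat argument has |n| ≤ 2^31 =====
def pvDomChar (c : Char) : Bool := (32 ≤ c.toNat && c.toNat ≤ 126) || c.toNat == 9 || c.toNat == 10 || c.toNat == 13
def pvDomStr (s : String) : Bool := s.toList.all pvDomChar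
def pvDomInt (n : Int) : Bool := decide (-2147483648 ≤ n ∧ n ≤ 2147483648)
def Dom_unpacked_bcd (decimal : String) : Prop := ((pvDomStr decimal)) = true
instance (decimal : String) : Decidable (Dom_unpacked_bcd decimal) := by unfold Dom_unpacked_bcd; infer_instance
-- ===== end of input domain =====

-- B replaces A's per-digit bit-shift and padding loops by a 10-entry lookup table
-- built once; the function body is a single join over table lookups.


-- ===== PORT A =====
-- 'while decimal > 0' loop of unsigned_binary; fuel only makes the loop total
-- (decimal halves each step, so fuel decimal.toNat + 1 is never exhausted).
def pvBinLoop : Nat → Int → List Char → List Char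
  | 0, _, binary => binary
  | fuel + 1, decimal, binary =>
    if decimal > 0 then
      pvBinLoop fuel (decimal >>> 1) (Char.ofNat ((PySem.Int.band decimal 1).toNat + 0x30) :: binary)
    else binary

def pvUnsignedBinary (decimal : Int) : List Char := pvBinLoop (decimal.toNat + 1) decimal []

-- 'while len(temp) < 8' padding loop; fuel 8 suffices since each step grows temp by one.
def pvPadLoop : Nat → List Char → List Char
  | 0, temp => temp
  | fuel + 1, temp => if temp.length < 8 then pvPadLoop fuel ('0' :: temp) else temp

def unpacked_bcd (decimal : String) : String :=
  String.mk (decimal.toList.foldl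
    (fun bcd unit =>
      -- int(unit): Pre_ excludes the none (ValueError) case, so getD 0 is never taken
      bcd ++ pvPadLoop 8 (pvUnsignedBinary ((PySem.Int.ofChars? [unit]).getD 0)))
    [])

-- ===== PORT B =====
-- the table {str(v): format(v, '08b') for v in range(10)}, built once
def pvBcdDict : PySem.Dict (List Char) (List Char) :=
  (PySem.List.pyRange 0 10 1).foldl
    (fun d v => d.insert (PySem.Int.toChars v) (PySem.Chars.zfill (PySem.Int.toBinChars v) 8))
    PySem.Dict.empty

-- ''.join([_BCD[unit] for unit in decimal]); _BCD[unit] raises KeyError on a non-digit,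
-- which Pre_ excludes, so the getD default is never taken there
def unpacked_bcd_alt (decimal : String) : String :=
  String.mk (List.flatten (decimal.toList.map
    (fun c => (pvBcdDict.get? [c]).getD [])))

-- ===== PRECONDITION & SPEC =====
-- Pre_ excludes strings with a non-digit character, on which Python A raises ValueError.
def Pre_unpacked_bcd (decimal : String) : Prop :=
  decimal.toList.all (fun c => decide (c ∈ ['0','1','2','3','4','5','6','7','8','9'])) = true
instance (decimal : String) : Decidable (Pre_unpacked_bcd decimal) := by
  unfold Pre_unpacked_bcd; infer_instance
def pvWitness_unpacked_bcd : String := "905"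

def Spec_unpacked_bcd (decimal : String) (out : String) : Prop := out = unpacked_bcd_alt decimal
instance (decimal : String) (out : String) : Decidable (Spec_unpacked_bcd decimal out) := by
  unfold Spec_unpacked_bcd; infer_instance

-- ===== CLAIM (what is proved, stated in full; the proofs are below) =====
def Claim_equal_unpacked_bcd : Prop := ∀ (decimal : String), Dom_unpacked_bcd decimal → Pre_unpacked_bcd decimal → Spec_unpacked_bcd decimal (unpacked_bcd decimal)

-- ===== LEMMAS AND PROOFS =====
-- On each admitted digit A's per-digit chunk equals B's table image (10 closed cases).
set_option maxRecDepth 100000 in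
theorem pv_perDigit : ∀ c ∈ ['0','1','2','3','4','5','6','7','8','9'],
    pvPadLoop 8 (pvUnsignedBinary ((PySem.Int.ofChars? [c]).getD 0))
      = (pvBcdDict.get? [c]).getD [] := by
  intro c hc
  fin_cases hc <;> decide

-- ===== VERDICT (by name: the statement is the Claim_ definition above) =====
theorem unpacked_bcd_spec : Claim_equal_unpacked_bcd := by
  intro decimal _ hpre
  unfold Pre_unpacked_bcd at hpre
  simp only [List.all_eq_true, decide_eq_true_eq] at hpre
  unfold Spec_unpacked_bcd unpacked_bcd unpacked_bcd_alt
  rw [PySem.List.foldl_append_eq_flatMap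
    (fun unit => pvPadLoop 8 (pvUnsignedBinary ((PySem.Int.ofChars? [unit]).getD 0)))]
  rw [List.flatMap_def]
  simp only [List.nil_append]
  exact congrArg String.mk (congrArg List.flatten
    (List.map_congr_left (fun c hc => pv_perDigit c (hpre c hc))))
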